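-- pv_equiv track=rewrite | github.com/goobits/stt | src/stt/text_formatting/entity_aware_sentence_detector.py | _is_after_sentence_ending
-- ===== SOURCE A (Python) =====
-- def _is_after_sentence_ending(position: int, text: str) -> bool:
--     """Check if position comes after sentence-ending punctuation."""
--     if position == 0:
--         return True
--
--     # Look backwards for sentence-ending punctuation
--     for i in range(position - 1, -1, -1):
--         char = text[i]
--         if char in '.!?':
--             # Found sentence ending - check if there's only whitespace between
--             between_text = text[i + 1:position]
--             if between_text.strip() == '':
--                 return True
--             break
--         elif not char.isspace():
--             # Found non-whitespace before any sentence ending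
--             break
--
--     return False
-- ===== SOURCE B (Python) =====
-- def _is_after_sentence_ending(position: int, text: str) -> bool:
--     """Check if position comes after sentence-ending punctuation."""
--     if position <= 0:
--         return position == 0
--     return text[:position].rstrip().endswith(('.', '!', '?'))
-- ===== Notes on version B (the rewrite author's own statement) =====
-- stated objective: simpler
-- what changed: Replaces the manual backward index loop with break logic (and its inner strip-of-slice check) by a two-line prefix/rstrip/endswith formulation: B takes text[:position], strips trailing whitespace, and tests the tuple-endswith for '.', '!', '?'.
import Mathlib
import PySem

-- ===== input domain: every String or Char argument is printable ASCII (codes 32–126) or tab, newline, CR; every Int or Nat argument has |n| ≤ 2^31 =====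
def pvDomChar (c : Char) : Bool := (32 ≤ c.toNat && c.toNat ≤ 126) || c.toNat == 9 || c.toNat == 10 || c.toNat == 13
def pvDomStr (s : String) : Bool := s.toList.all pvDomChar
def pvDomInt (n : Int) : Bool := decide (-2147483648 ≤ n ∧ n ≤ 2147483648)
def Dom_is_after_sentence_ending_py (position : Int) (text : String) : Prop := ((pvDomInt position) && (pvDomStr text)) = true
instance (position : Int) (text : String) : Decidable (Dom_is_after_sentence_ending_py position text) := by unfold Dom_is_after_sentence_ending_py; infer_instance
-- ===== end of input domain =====

-- B replaces A's manual backward scan with break logic by a two-line prefix/rstrip/tuple-endswith formulation (simpler; same return value on Pre_).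

-- ===== PORT A =====
-- the backward for-loop over range(position-1, -1, -1) with its two break branches;
-- Python's `char in '.!?'` on the single character char is ported exactly as the three equality tests
def pvLoopA (text : String) (position : Int) : List Int → Bool
  | [] => false
  | i :: rest =>
    match PySem.Str.pyGet? text i with
    | none => false  -- IndexError; excluded by Pre_
    | some c =>
      if c = '.' ∨ c = '!' ∨ c = '?' then
        -- between_text = text[i+1:position]; return True iff between_text.strip() == '', else break
        decide (PySem.Str.strip (PySem.Str.slice text (some (i + 1)) (some position)) = "")
      else if ¬ (PySem.Chars.isspace c = true) then false
      else pvLoopA text position rest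

def is_after_sentence_ending_py (position : Int) (text : String) : Bool :=
  if position = 0 then true
  else pvLoopA text position (PySem.List.pyRange (position - 1) (-1) (-1))

-- ===== PORT B =====
-- Python's stripped.endswith(('.', '!', '?')) is ported exactly as the disjunction of the three endswith tests
def is_after_sentence_ending_py_alt (position : Int) (text : String) : Bool :=
  if position ≤ 0 then decide (position = 0)
  else
    let stripped := PySem.Str.rstrip (PySem.Str.slice text none (some position))
    PySem.Str.endswith stripped "." || PySem.Str.endswith stripped "!" || PySem.Str.endswith stripped "?"

-- ===== PRECONDITION & SPEC =====
-- A raises IndexError exactly when position > len(text) (the loop's first index position-1 is then out of range); Pre_ excludes only those inputs.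
def Pre_is_after_sentence_ending_py (position : Int) (text : String) : Prop :=
  position ≤ PySem.Str.len text
instance (position : Int) (text : String) : Decidable (Pre_is_after_sentence_ending_py position text) := by unfold Pre_is_after_sentence_ending_py; infer_instance

def pvWitness_is_after_sentence_ending_py : Int × String := (3, "a. b")

def Spec_is_after_sentence_ending_py (position : Int) (text : String) (out : Bool) : Prop := out = is_after_sentence_ending_py_alt position text
instance (position : Int) (text : String) (out : Bool) : Decidable (Spec_is_after_sentence_ending_py position text out) := by unfold Spec_is_after_sentence_ending_py; infer_instance

-- ===== CLAIM (what is proved, stated in full; the proofs are below) =====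
def Claim_equal_is_after_sentence_ending_py : Prop := ∀ (position : Int) (text : String), Dom_is_after_sentence_ending_py position text → Pre_is_after_sentence_ending_py position text → Spec_is_after_sentence_ending_py position text (is_after_sentence_ending_py position text)

-- ===== LEMMAS AND PROOFS =====

-- the value both sides compute for a positive position: look at the reversed prefix with
-- leading whitespace dropped; true iff it then starts with sentence-ending punctuation
def pvHeadPunct : List Char → Bool
  | [] => false
  | c :: _ => decide (c = '.' ∨ c = '!' ∨ c = '?')

theorem pv_punct_not_ws (c : Char) (h : c = '.' ∨ c = '!' ∨ c = '?') :
    PySem.Chars.isspace c = false := by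
  rcases h with h | h | h <;> subst h <;> decide

theorem pv_strip_of_all_ws (cs : List Char)
    (h : ∀ c ∈ cs, PySem.Chars.isspace c = true) : PySem.Chars.strip cs = [] := by
  simp [PySem.Chars.strip, PySem.Chars.lstrip, PySem.Chars.rstrip, List.dropWhile_eq_nil_iff]
  intro x hx
  exact h x (List.dropWhile_subset _ hx)

theorem pv_endswith3 (R : List Char) :
    (PySem.Chars.endswith R.reverse ['.'] || PySem.Chars.endswith R.reverse ['!'] ||
      PySem.Chars.endswith R.reverse ['?']) = pvHeadPunct R := by
  cases R with
  | nil => rfl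
  | cons c t =>
    simp only [pvHeadPunct]
    simp [PySem.Chars.endswith, List.isSuffixOf, List.reverse_cons, List.isPrefixOf]
    by_cases h1 : c = '.' <;> by_cases h2 : c = '!' <;> by_cases h3 : c = '?' <;>
      simp [h1, h2, h3] <;> simp [eq_comm, h1, h2, h3]

-- B's body for a positive position, read off the reversed character list
theorem pv_alt_body_eq (s : String) :
    (PySem.Str.endswith (PySem.Str.rstrip s) "." || PySem.Str.endswith (PySem.Str.rstrip s) "!" ||
      PySem.Str.endswith (PySem.Str.rstrip s) "?") =
      pvHeadPunct (s.toList.reverse.dropWhile PySem.Chars.isspace) := by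
  have h : (PySem.Str.rstrip s).toList =
      (s.toList.reverse.dropWhile PySem.Chars.isspace).reverse := by
    simp [PySem.Str.toList_rstrip, PySem.Chars.rstrip]
  calc (PySem.Str.endswith (PySem.Str.rstrip s) "." || PySem.Str.endswith (PySem.Str.rstrip s) "!" ||
      PySem.Str.endswith (PySem.Str.rstrip s) "?")
      = (PySem.Chars.endswith (PySem.Str.rstrip s).toList ['.'] ||
         PySem.Chars.endswith (PySem.Str.rstrip s).toList ['!'] ||
         PySem.Chars.endswith (PySem.Str.rstrip s).toList ['?']) := by rfl
    _ = pvHeadPunct (s.toList.reverse.dropWhile PySem.Chars.isspace) := by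
         rw [h]; exact pv_endswith3 _

-- A's loop, started at index j-1 with only whitespace between j and position, is pvHeadPunct
-- of the reversed length-j prefix with its leading whitespace dropped
theorem pv_loopA_eq (text : String) (p : Int) (hle : p.toNat ≤ text.toList.length)
    (j : Nat) (hj : j ≤ p.toNat)
    (hws : ∀ c ∈ (text.toList.drop j).take (p.toNat - j), PySem.Chars.isspace c = true) :
    pvLoopA text p (PySem.List.pyRange ((j : Int) - 1) (-1) (-1)) =
      pvHeadPunct ((text.toList.take j).reverse.dropWhile PySem.Chars.isspace) := by
  induction j with
  | zero =>
    rw [show ((0 : Nat) : Int) - 1 = -1 by norm_num,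
        PySem.List.pyRange_neg_one_eq_nil (by norm_num)]
    simp [pvLoopA, pvHeadPunct]
  | succ j ih =>
    have hjlt : j < p.toNat := hj
    have hjlen : j < text.toList.length := lt_of_lt_of_le hjlt hle
    rw [show ((j + 1 : Nat) : Int) - 1 = (j : Int) by push_cast; ring,
        PySem.List.pyRange_neg_one_cons (by omega)]
    have hget : PySem.Str.pyGet? text (j : Int) = some (text.toList[j]) := by
      simp [List.getElem?_eq_getElem hjlen]
    have htake : text.toList.take (j + 1) = text.toList.take j ++ [text.toList[j]] := by
      rw [List.take_add_one]; simp [List.getElem?_eq_getElem hjlen]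
    simp only [pvLoopA, hget]
    by_cases hpunct : text.toList[j] = '.' ∨ text.toList[j] = '!' ∨ text.toList[j] = '?'
    · rw [if_pos hpunct]
      have hsl : (PySem.Str.slice text (some ((j : Int) + 1)) (some p)).toList =
          (text.toList.drop (j + 1)).take (p.toNat - (j + 1)) := by
        rw [PySem.Str.toList_slice, PySem.Chars.slice_eq_listSlice,
            show ((j : Int) + 1) = ((j + 1 : Nat) : Int) by push_cast; ring,
            PySem.List.slice_toNat _ (by positivity) (by omega)]
        simp
      have hstrip : PySem.Str.strip (PySem.Str.slice text (some ((j : Int) + 1)) (some p)) = "" := by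
        rw [← String.toList_eq_nil_iff, PySem.Str.toList_strip, hsl]
        exact pv_strip_of_all_ws _ hws
      rw [htake, List.reverse_append]
      simp [hstrip, pv_punct_not_ws _ hpunct, pvHeadPunct, hpunct]
    · rw [if_neg hpunct]
      by_cases hwsc : PySem.Chars.isspace (text.toList[j]) = true
      · rw [if_neg (by simp [hwsc])]
        rw [htake, List.reverse_append]
        simp only [List.reverse_cons, List.reverse_nil, List.nil_append, List.singleton_append,
          List.dropWhile_cons, hwsc]
        refine ih (le_of_lt hjlt) ?_
        rw [List.drop_eq_getElem_cons hjlen, show p.toNat - j = (p.toNat - (j + 1)) + 1 by omega,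
            List.take_succ_cons]
        intro c hc
        rcases List.mem_cons.mp hc with h | h
        · exact h ▸ hwsc
        · exact hws c h
      · rw [if_pos (by simp [hwsc])]
        rw [htake, List.reverse_append]
        simp [hwsc, pvHeadPunct, hpunct]

-- ===== VERDICT (by name: the statement is the Claim_ definition above) =====
theorem is_after_sentence_ending_py_spec : Claim_equal_is_after_sentence_ending_py := by
  intro p text _hdom hpre
  unfold Spec_is_after_sentence_ending_py
  by_cases h0 : p = 0
  · simp [is_after_sentence_ending_py, is_after_sentence_ending_py_alt, h0]
  · by_cases hneg : p < 0
    · rw [is_after_sentence_ending_py, if_neg h0,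
          PySem.List.pyRange_neg_one_eq_nil (by omega)]
      simp [pvLoopA, is_after_sentence_ending_py_alt, le_of_lt hneg, h0]
    · have hp : 0 < p := by omega
      have hple : p.toNat ≤ text.toList.length := by
        unfold Pre_is_after_sentence_ending_py PySem.Str.len at hpre; omega
      rw [is_after_sentence_ending_py, if_neg h0,
          show p - 1 = ((p.toNat : Nat) : Int) - 1 by omega,
          pv_loopA_eq text p hple p.toNat le_rfl (by simp)]
      rw [is_after_sentence_ending_py_alt, if_neg (by omega)]
      have hsl : (PySem.Str.slice text none (some p)).toList = text.toList.take p.toNat := by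
        rw [PySem.Str.toList_slice, PySem.Chars.slice_eq_listSlice,
            PySem.List.slice_to _ (le_of_lt hp)]
      have halt := pv_alt_body_eq (PySem.Str.slice text none (some p))
      rw [hsl] at halt
      exact halt.symm
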